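-- pv_equiv track=rewrite | github.com/cgl/CWA-Normalizer | main/tools.py | create_extended_mapp
-- ===== SOURCE A (Python) =====
-- def create_extended_mapp(results,not_oov):
--     i = 0
--     mapp_ext = []
--     for ind,tweet in enumerate(results):
--         for word in tweet:
--             if word[1] == "OOV":
--                 if not not_oov[i]:
--                     mapp_ext.append((ind,word[0]))
--                 i += 1
--     return mapp_ext
-- ===== SOURCE B (Python) =====
-- def create_extended_mapp(results, not_oov):
--     def go(ind, rest, flags):
--         if not rest:
--             return []
--         oov_words = [w for w, t in rest[0] if t == "OOV"]
--         c = len(oov_words)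
--         here = [(ind, w) for w, f in zip(oov_words, flags[:c]) if not f]
--         return here + go(ind + 1, rest[1:], flags[c:])
--     return go(0, results, not_oov)
-- ===== Notes on version B (the rewrite author's own statement) =====
-- stated objective: alternative
-- what changed: Replaces A's flat double loop with a threaded global counter by a structural recursion over the tweets in which the flag list itself is consumed by slicing: each call extracts one tweet's OOV words, filters them against a prefix of the remaining flags, and recurses on the rest of the flags, so no index into not_oov ever exists.
import Mathlib
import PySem

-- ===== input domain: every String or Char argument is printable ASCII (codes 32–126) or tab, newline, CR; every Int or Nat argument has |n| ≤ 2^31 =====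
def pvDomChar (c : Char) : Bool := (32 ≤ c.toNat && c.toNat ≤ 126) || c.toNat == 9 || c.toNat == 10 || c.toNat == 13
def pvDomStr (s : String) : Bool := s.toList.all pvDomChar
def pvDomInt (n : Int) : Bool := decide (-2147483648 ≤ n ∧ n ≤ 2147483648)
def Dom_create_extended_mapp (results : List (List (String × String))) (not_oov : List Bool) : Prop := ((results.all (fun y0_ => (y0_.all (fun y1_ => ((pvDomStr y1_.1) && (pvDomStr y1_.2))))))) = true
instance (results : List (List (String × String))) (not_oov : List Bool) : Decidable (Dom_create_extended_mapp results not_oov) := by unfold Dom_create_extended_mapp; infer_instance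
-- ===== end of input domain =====

-- B replaces A's counter-threaded double loop by a structural recursion over the
-- tweets that consumes the flag list by slicing (alternative decomposition);
-- return value only, no mutation.

-- ===== PORT A =====
-- single pass: enumerate(results), inner loop over tweet, counter i threaded through
def create_extended_mapp (results : List (List (String × String))) (not_oov : List Bool) : List (Int × String) :=
  (results.zipIdx.foldl
    (fun (st : Nat × List (Int × String)) p =>
      p.1.foldl
        (fun (st : Nat × List (Int × String)) w =>
          if w.2 = "OOV" then
            if not_oov.getD st.1 false = false then (st.1 + 1, st.2 ++ [((p.2 : Int), w.1)])
            else (st.1 + 1, st.2)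
          else st) st)
    (0, [])).2

-- ===== PORT B =====
-- recursion over tweets: one tweet's OOV words are filtered against a prefix of
-- the remaining flags, the recursion continues with the rest of the flags.
-- flags[:c] / flags[c:] with c = a list length (≥ 0) are exactly take/drop.
def cem_go (ind : Int) (rest : List (List (String × String))) (flags : List Bool) : List (Int × String) :=
  match rest with
  | [] => []
  | tweet :: ts =>
    let oov_words := tweet.filterMap (fun w => if w.2 = "OOV" then some w.1 else none)
    let c := oov_words.length
    let here := (oov_words.zip (flags.take c)).filterMap
      (fun q => if q.2 = true then none else some (ind, q.1))
    here ++ cem_go (ind + 1) ts (flags.drop c)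

def create_extended_mapp_alt (results : List (List (String × String))) (not_oov : List Bool) : List (Int × String) :=
  cem_go 0 results not_oov

-- ===== PRECONDITION & SPEC =====
-- Pre_ excludes exactly the inputs on which A raises IndexError (more OOV words than
-- len(not_oov)); on those inputs B's slicing truncates and returns a value instead.
def Pre_create_extended_mapp (results : List (List (String × String))) (not_oov : List Bool) : Prop :=
  (results.map (fun t => (t.filter (fun w => w.2 = "OOV")).length)).sum ≤ not_oov.length
instance (results : List (List (String × String))) (not_oov : List Bool) : Decidable (Pre_create_extended_mapp results not_oov) := by unfold Pre_create_extended_mapp; infer_instance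
def pvWitness_create_extended_mapp : (List (List (String × String))) × List Bool :=
  ([[("a", "OOV"), ("b", "x")], [("c", "OOV")]], [false, true])

def Spec_create_extended_mapp (results : List (List (String × String))) (not_oov : List Bool) (out : List (Int × String)) : Prop := out = create_extended_mapp_alt results not_oov
instance (results : List (List (String × String))) (not_oov : List Bool) (out : List (Int × String)) : Decidable (Spec_create_extended_mapp results not_oov out) := by unfold Spec_create_extended_mapp; infer_instance

-- ===== CLAIM (what is proved, stated in full; the proofs are below) =====
def Claim_equal_create_extended_mapp : Prop := ∀ (results : List (List (String × String))) (not_oov : List Bool), Dom_create_extended_mapp results not_oov → Pre_create_extended_mapp results not_oov → Spec_create_extended_mapp results not_oov (create_extended_mapp results not_oov)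

-- ===== LEMMAS AND PROOFS =====

-- the flat OOV list of one tweet (pairs carrying the tweet index)
def oovOf (ind : Int) (tweet : List (String × String)) : List (Int × String) :=
  tweet.filterMap (fun w => if w.2 = "OOV" then some (ind, w.1) else none)

-- the full flat OOV list starting at enumerate index n
def oovFlat (n : Nat) (results : List (List (String × String))) : List (Int × String) :=
  (results.zipIdx n).flatMap (fun p => oovOf (p.2 : Int) p.1)

-- A's selection of a flat list, counter starting at i
def selFrom (bs : List Bool) (i : Nat) : List (Int × String) → List (Int × String)
  | [] => []
  | x :: xs => (if bs[i]?.getD false = false then [x] else []) ++ selFrom bs (i + 1) xs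

theorem selFrom_append (bs : List Bool) (i : Nat) (l1 l2 : List (Int × String)) :
    selFrom bs i (l1 ++ l2) = selFrom bs i l1 ++ selFrom bs (i + l1.length) l2 := by
  induction l1 generalizing i with
  | nil => simp [selFrom]
  | cons x xs ih =>
      simp [selFrom, ih (i + 1), List.append_assoc]
      ring_nf

-- inner loop of A over one tweet
theorem inner_loop (not_oov : List Bool) (ind : Int) (tweet : List (String × String))
    (i : Nat) (acc : List (Int × String)) :
    tweet.foldl
      (fun (st : Nat × List (Int × String)) w =>
        if w.2 = "OOV" then
          if not_oov.getD st.1 false = false then (st.1 + 1, st.2 ++ [(ind, w.1)])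
          else (st.1 + 1, st.2)
        else st) (i, acc)
    = (i + (oovOf ind tweet).length, acc ++ selFrom not_oov i (oovOf ind tweet)) := by
  induction tweet generalizing i acc with
  | nil => simp [oovOf, selFrom]
  | cons w ws ih =>
      simp only [List.getD_eq_getElem?_getD] at ih ⊢
      by_cases h : w.2 = "OOV"
      · by_cases hb : not_oov[i]?.getD false = false
        · rw [List.foldl_cons, if_pos h, if_pos hb, ih]
          simp [oovOf, List.filterMap_cons, h, hb, selFrom, Prod.ext_iff]
          omega
        · rw [List.foldl_cons, if_pos h, if_neg hb, ih]
          simp [oovOf, List.filterMap_cons, h, hb, selFrom, Prod.ext_iff]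
          omega
      · rw [List.foldl_cons, if_neg h]
        simpa [oovOf, h] using ih i acc

-- outer loop of A
theorem outer_loop (not_oov : List Bool) (results : List (List (String × String)))
    (n : Nat) (i : Nat) (acc : List (Int × String)) :
    ((results.zipIdx n).foldl
      (fun (st : Nat × List (Int × String)) p =>
        p.1.foldl
          (fun (st : Nat × List (Int × String)) w =>
            if w.2 = "OOV" then
              if not_oov.getD st.1 false = false then (st.1 + 1, st.2 ++ [((p.2 : Int), w.1)])
              else (st.1 + 1, st.2)
            else st) st) (i, acc))
    = (i + (oovFlat n results).length, acc ++ selFrom not_oov i (oovFlat n results)) := by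
  induction results generalizing n i acc with
  | nil => simp [oovFlat, selFrom]
  | cons t ts ih =>
      rw [List.zipIdx_cons, List.foldl_cons, inner_loop, ih]
      simp only [oovFlat, List.zipIdx_cons, List.flatMap_cons, selFrom_append]
      simp [Prod.ext_iff, List.append_assoc]
      omega

-- zip-filter characterisation of A's selection when there are enough flags
theorem sel_eq_zip (bs : List Bool) (l : List (Int × String)) (i : Nat)
    (h : i + l.length ≤ bs.length) :
    selFrom bs i l
      = ((l.zip (bs.drop i)).filterMap (fun q => if q.2 then none else some q.1)) := by
  induction l generalizing i with
  | nil => simp [selFrom]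
  | cons x xs ih =>
      have hi : i < bs.length := by simp at h; omega
      have hdrop : bs.drop i = bs[i] :: bs.drop (i + 1) := (List.getElem_cons_drop hi).symm
      have hgd : bs[i]?.getD false = bs[i] := by rw [List.getElem?_eq_getElem hi]; rfl
      rw [hdrop]
      simp only [List.zip_cons_cons, List.filterMap_cons]
      rw [← ih (i + 1) (by simp at h ⊢; omega)]
      cases hb : bs[i] with
      | false => simp [selFrom, hgd, hb]
      | true => simp [selFrom, hgd, hb]

-- shifting the counter = dropping flags
theorem selFrom_drop (bs : List Bool) (c : Nat) (l : List (Int × String)) :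
    ∀ i, selFrom bs (c + i) l = selFrom (bs.drop c) i l := by
  induction l with
  | nil => intro i; simp [selFrom]
  | cons x xs ih =>
      intro i
      have : (bs.drop c)[i]? = bs[c + i]? := by
        rw [List.getElem?_drop]
      simp [selFrom, this, ← ih (i + 1), Nat.add_assoc]

theorem selFrom_drop0 (bs : List Bool) (c : Nat) (l : List (Int × String)) :
    selFrom bs c l = selFrom (bs.drop c) 0 l := by
  simpa using selFrom_drop bs c l 0

-- oovOf is the tweet's OOV words tagged with the index
theorem oovOf_map (ind : Int) (t : List (String × String)) :
    oovOf ind t = (t.filterMap (fun w => if w.2 = "OOV" then some w.1 else none)).map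
      (fun w => (ind, w)) := by
  induction t with
  | nil => rfl
  | cons w ws ih => by_cases h : w.2 = "OOV" <;> simp [oovOf, h] <;> simpa [oovOf] using ih

-- zipping with a take of exactly the list's length changes nothing
theorem zip_take_self {α β : Type} (l : List α) (bs : List β) :
    l.zip (bs.take l.length) = l.zip bs := by
  induction l generalizing bs with
  | nil => simp
  | cons x xs ih => cases bs with
      | nil => simp
      | cons b bs => simp [ih]

-- pushing the map through zip-then-filterMap
theorem map_zip_filterMap (ind : Int) (l : List String) (bs : List Bool) :
    (((l.map (fun w => (ind, w))).zip bs).filterMap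
        (fun q => if q.2 then none else some q.1))
      = ((l.zip bs).filterMap (fun q => if q.2 = true then none else some (ind, q.1))) := by
  induction l generalizing bs with
  | nil => simp
  | cons x xs ih => cases bs with
      | nil => simp
      | cons b bs => cases b <;> simp [ih]

theorem oovFlat_cons (n : Nat) (t : List (String × String)) (ts : List (List (String × String))) :
    oovFlat n (t :: ts) = oovOf (n : Int) t ++ oovFlat (n + 1) ts := by
  simp [oovFlat, List.zipIdx_cons]

-- B equals A's selection when there are enough flags
theorem go_eq_selFrom (results : List (List (String × String))) :
    ∀ (n : Nat) (flags : List Bool), (oovFlat n results).length ≤ flags.length →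
      cem_go (n : Int) results flags = selFrom flags 0 (oovFlat n results) := by
  induction results with
  | nil => intro n flags _; simp [cem_go, oovFlat, selFrom]
  | cons t ts ih =>
      intro n flags h
      rw [oovFlat_cons] at h ⊢
      simp only [List.length_append] at h
      have hc : (oovOf (n : Int) t).length
          = (t.filterMap (fun w => if w.2 = "OOV" then some w.1 else none)).length := by
        rw [oovOf_map, List.length_map]
      rw [selFrom_append, Nat.zero_add, selFrom_drop0 flags (oovOf (n : Int) t).length _]
      rw [sel_eq_zip flags _ 0 (by omega), List.drop_zero]
      show cem_go (n : Int) (t :: ts) flags = _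
      rw [cem_go]
      have hcast : ((n : Int) + 1) = ((n + 1 : Nat) : Int) := by push_cast; ring
      rw [hcast, ih (n + 1) _ (by simp; omega)]
      congr 1
      · rw [oovOf_map, ← hc, map_zip_filterMap, hc, zip_take_self]
      · rw [hc]

theorem oovOf_length (ind : Int) (t : List (String × String)) :
    (oovOf ind t).length = (t.filter (fun w => w.2 = "OOV")).length := by
  induction t with
  | nil => rfl
  | cons w ws ih =>
      by_cases h : w.2 = "OOV" <;> simp [oovOf, h] <;>
        simpa [oovOf] using ih

theorem oovFlat_length (results : List (List (String × String))) (n : Nat) :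
    (oovFlat n results).length
      = (results.map (fun t => (t.filter (fun w => w.2 = "OOV")).length)).sum := by
  induction results generalizing n with
  | nil => simp [oovFlat]
  | cons t ts ih =>
      simp only [oovFlat, List.zipIdx_cons, List.flatMap_cons, List.length_append,
        List.map_cons, List.sum_cons]
      rw [oovOf_length]
      congr 1
      exact ih (n + 1)

-- ===== VERDICT (by name: the statement is the Claim_ definition above) =====
theorem create_extended_mapp_spec : Claim_equal_create_extended_mapp := by
  intro results not_oov _ hpre
  unfold Spec_create_extended_mapp create_extended_mapp create_extended_mapp_alt
  rw [outer_loop]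
  simp only [List.nil_append]
  have hlen : (oovFlat 0 results).length ≤ not_oov.length := by
    rw [oovFlat_length]; exact hpre
  rw [show (0 : Int) = ((0 : Nat) : Int) from rfl, go_eq_selFrom results 0 not_oov hlen]
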